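-- pv_equiv track=rewrite | github.com/Yuhaojjjj/python | fecha.py | devuelve_mes
-- ===== SOURCE A (Python) =====
-- def devuelve_mes(fecha):
--     mes = ""
--     i = 0
--     nespacios = 0
--     while(i < len(fecha)):
--         if(fecha[i] == " "):
--             nespacios += 1
--         else:
--             if(nespacios == 2):
--                 mes += fecha[i]
--         i += 1
--     return(mes)
-- ===== SOURCE B (Python) =====
-- def devuelve_mes(fecha):
--     partes = fecha.split(" ")
--     return partes[2] if len(partes) > 2 else ""
-- ===== Notes on version B (the rewrite author's own statement) =====
-- stated objective: simpler
-- what changed: Replaces the character-by-character scan with a running space counter and accumulator by splitting the string on single spaces once and indexing the third segment (empty-string fallback).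
import Mathlib
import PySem

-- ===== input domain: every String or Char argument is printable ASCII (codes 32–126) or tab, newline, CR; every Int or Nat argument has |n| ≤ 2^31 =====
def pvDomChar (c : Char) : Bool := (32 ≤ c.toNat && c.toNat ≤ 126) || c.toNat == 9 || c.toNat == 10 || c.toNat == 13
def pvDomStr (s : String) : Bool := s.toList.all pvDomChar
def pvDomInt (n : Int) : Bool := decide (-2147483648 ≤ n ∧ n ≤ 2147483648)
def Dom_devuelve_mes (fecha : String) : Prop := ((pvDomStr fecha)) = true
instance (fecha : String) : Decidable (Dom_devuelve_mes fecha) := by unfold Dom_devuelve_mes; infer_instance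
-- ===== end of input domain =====

-- B replaces A's character scan (space counter + accumulator) by one split(" ") and an index; objective: simpler.

-- ===== PORT A =====
-- A: while-loop over indices with state (nespacios, mes); ported as a fold over the characters with the same state.
def devuelve_mes (fecha : String) : String :=
  let r := fecha.toList.foldl
    (fun (st : Int × List Char) c =>
      if c = ' ' then (st.1 + 1, st.2)
      else if st.1 = 2 then (st.1, st.2 ++ [c]) else st)
    (0, [])
  String.ofList r.2

-- ===== PORT B =====
def devuelve_mes_alt (fecha : String) : String :=
  let partes := (PySem.Str.split? fecha " ").getD []   -- sep ≠ "", so split? is always `some`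
  if 2 < partes.length then (PySem.List.pyGet? partes 2).getD "" else ""

-- ===== PRECONDITION & SPEC =====
def Spec_devuelve_mes (fecha : String) (out : String) : Prop := out = devuelve_mes_alt fecha
instance (fecha : String) (out : String) : Decidable (Spec_devuelve_mes fecha out) := by unfold Spec_devuelve_mes; infer_instance

-- ===== CLAIM (what is proved, stated in full; the proofs are below) =====
def Claim_equal_devuelve_mes : Prop := ∀ (fecha : String), Dom_devuelve_mes fecha → Spec_devuelve_mes fecha (devuelve_mes fecha)

-- ===== LEMMAS AND PROOFS =====

-- simple structural recursion computing split on a single space, used as the common spec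
def segs : List Char → List (List Char)
  | [] => [[]]
  | c :: rest =>
    if c = ' ' then [] :: segs rest
    else match segs rest with
      | s :: ss => (c :: s) :: ss
      | [] => [[c]]

theorem segs_ne_nil (cs : List Char) : segs cs ≠ [] := by
  cases cs with
  | nil => simp [segs]
  | cons c rest =>
    simp only [segs]
    split_ifs
    · simp
    · cases h : segs rest <;> simp

theorem splitOn_go_eq_segs (fuel : Nat) :
    ∀ (l cur : List Char) (acc : List (List Char)), l.length < fuel →
      PySem.Chars.splitOn.go [' '] fuel l cur acc =
        acc.reverse ++ (match segs l with
                        | s :: ss => (cur.reverse ++ s) :: ss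
                        | [] => [cur.reverse]) := by
  induction fuel with
  | zero => intro l cur acc h; omega
  | succ n ih =>
    intro l cur acc h
    cases l with
    | nil => simp [PySem.Chars.splitOn.go, segs]
    | cons c rest =>
      by_cases hc : c = ' '
      · subst hc
        have hpre : ([' '] : List Char).isPrefixOf (' ' :: rest) = true := by
          simp [List.isPrefixOf]
        rw [PySem.Chars.splitOn.go, if_pos hpre]
        simp only [List.length_cons] at h
        simp only [List.length_cons, List.length_nil, List.drop_succ_cons, List.drop_zero]
        rw [ih rest [] (cur.reverse :: acc) (by omega)]
        simp only [segs, reduceIte]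
        cases hs : segs rest with
        | nil => exact absurd hs (segs_ne_nil rest)
        | cons s ss => simp
      · have hpre : ([' '] : List Char).isPrefixOf (c :: rest) = false := by
          simp [List.isPrefixOf]
          exact fun h' => hc h'.symm
        rw [PySem.Chars.splitOn.go, if_neg (by simp [hpre])]
        simp only [List.length_cons] at h
        rw [ih rest (c :: cur) acc (by omega)]
        simp only [segs, if_neg hc]
        cases hs : segs rest with
        | nil => exact absurd hs (segs_ne_nil rest)
        | cons s ss => simp

theorem splitOn_eq_segs (cs : List Char) :
    PySem.Chars.splitOn cs [' '] = segs cs := by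
  unfold PySem.Chars.splitOn
  rw [splitOn_go_eq_segs (cs.length + 1) cs [] [] (by omega)]
  cases hs : segs cs with
  | nil => exact absurd hs (segs_ne_nil cs)
  | cons s ss => simp

-- A's loop, named for the invariant proof
def loopA (st : Int × List Char) (cs : List Char) : Int × List Char :=
  cs.foldl
    (fun (st : Int × List Char) c =>
      if c = ' ' then (st.1 + 1, st.2)
      else if st.1 = 2 then (st.1, st.2 ++ [c]) else st)
    st

-- invariant: with space count n ≥ 0 so far, the loop appends segment (2 - n) of the split
theorem loopA_spec (cs : List Char) :
    ∀ (n : Int) (acc : List Char), 0 ≤ n →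
      (loopA (n, acc) cs).2 =
        acc ++ (if n ≤ 2 then (segs cs).getD (2 - n).toNat [] else []) := by
  induction cs with
  | nil =>
    intro n acc _
    simp only [loopA, List.foldl_nil, segs]
    split_ifs with h
    · rcases (by omega : n = 0 ∨ n = 1 ∨ n = 2) with h0 | h0 | h0 <;>
        subst h0 <;> simp
    · simp
  | cons c rest ih =>
    intro n acc hn
    by_cases hc : c = ' '
    · subst hc
      simp only [loopA, List.foldl_cons, reduceIte]
      rw [show (List.foldl _ (n + 1, acc) rest) = loopA (n + 1, acc) rest from rfl,
          ih (n + 1) acc (by omega)]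
      simp only [segs, reduceIte]
      split_ifs with h1 h2 h2
      · -- n + 1 ≤ 2 and n ≤ 2
        have : (2 - n).toNat = (2 - (n + 1)).toNat + 1 := by omega
        simp [this]
      · omega
      · -- n ≤ 2 but n + 1 > 2, so n = 2: index 0 of [] :: _
        have : (2 - n).toNat = 0 := by omega
        simp [this]
      · rfl
    · simp only [loopA, List.foldl_cons, if_neg hc]
      by_cases h2 : n = 2
      · subst h2
        simp only [reduceIte]
        rw [show (List.foldl _ ((2 : Int), acc ++ [c]) rest) = loopA (2, acc ++ [c]) rest from rfl,
            ih 2 (acc ++ [c]) (by omega)]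
        simp only [segs, if_neg hc]
        cases hs : segs rest with
        | nil => exact absurd hs (segs_ne_nil rest)
        | cons s ss => simp
      · simp only [if_neg h2]
        rw [show (List.foldl _ (n, acc) rest) = loopA (n, acc) rest from rfl,
            ih n acc hn]
        simp only [segs, if_neg hc]
        cases hs : segs rest with
        | nil => exact absurd hs (segs_ne_nil rest)
        | cons s ss =>
          split_ifs with h1
          · have : (2 - n).toNat = ((2 - n).toNat - 1) + 1 := by omega
            rw [this]
            simp
          · rfl

theorem devuelve_mes_eq (fecha : String) :
    devuelve_mes fecha = String.ofList ((segs fecha.toList).getD 2 []) := by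
  have h0 : devuelve_mes fecha = String.ofList ((loopA (0, []) fecha.toList).2) := rfl
  rw [h0, loopA_spec fecha.toList 0 [] (by omega)]
  norm_num
  rfl

theorem devuelve_mes_alt_eq (fecha : String) :
    devuelve_mes_alt fecha = String.ofList ((segs fecha.toList).getD 2 []) := by
  unfold devuelve_mes_alt
  have hsplit : PySem.Str.split? fecha " " =
      some ((segs fecha.toList).map String.ofList) := by
    unfold PySem.Str.split? PySem.Chars.split?
    simp [show (" " : String).toList = [' '] from rfl, splitOn_eq_segs]
  rw [hsplit]
  simp only [Option.getD_some, List.length_map]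
  by_cases h : 2 < (segs fecha.toList).length
  · rw [if_pos h]
    rw [show ((2 : Int) = ((2 : Nat) : Int)) from rfl, PySem.List.pyGet?_natCast]
    rw [List.getElem?_map, List.getElem?_eq_getElem (by simpa using h)]
    simp [List.getD, List.getElem?_eq_getElem (by simpa using h)]
  · rw [if_neg h]
    rw [List.getD_eq_default _ _ (by omega)]

-- ===== VERDICT (by name: the statement is the Claim_ definition above) =====
theorem devuelve_mes_spec : Claim_equal_devuelve_mes := by
  intro fecha _
  unfold Spec_devuelve_mes
  rw [devuelve_mes_eq, devuelve_mes_alt_eq]
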